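-- pv_equiv track=rewrite | github.com/variasov/classic-db-tools | sources/classic/db_tools/mapping/find_root.py | find_root_in_dag
-- ===== SOURCE A (Python) =====
-- from collections import defaultdict
--
-- def find_root_in_dag(graph_adj):
--     """
--     Finds the root of a Directed Acyclic Graph (DAG).
--     The root is defined as a node with an in-degree of 0, from which all other nodes are reachable.
--
--     Args:
--         graph_adj (dict): An adjacency list representation of the graph,
--                           where keys are nodes and values are lists of their neighbors.
--                           Example: {0: [1, 2], 1: [3], 2: [3], 3: []}
--
--     Returns:
--         int or None: The root node if a unique root exists, None otherwise.
--     """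
--
--     in_degree = defaultdict(int)
--     nodes = set()
--
--     # Calculate in-degrees for all nodes
--     for node, neighbors in graph_adj.items():
--         nodes.add(node)
--         for neighbor in neighbors:
--             in_degree[neighbor] += 1
--             nodes.add(neighbor)
--
--     root_candidates = []
--     for node in nodes:
--         if in_degree[node] == 0:
--             root_candidates.append(node)
--
--     if len(root_candidates) == 1:
--         return root_candidates[0]
--     else:
--         # No unique root (either multiple sources or no nodes with in-degree 0)
--         return None
-- ===== SOURCE B (Python) =====
-- def find_root_in_dag(graph_adj):
--     # Sorted set-difference: sort the keys and the distinct neighbor values, then a single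
--     # two-pointer merge emits the keys absent from the neighbor list; unique one is the root.
--     keys = sorted(graph_adj)
--     targets = sorted({n for ns in graph_adj.values() for n in ns})
--     roots = []
--     i = 0
--     m = len(targets)
--     for k in keys:
--         while i < m and targets[i] < k:
--             i += 1
--         if i == m or targets[i] != k:
--             roots.append(k)
--     return roots[0] if len(roots) == 1 else None
-- ===== Notes on version B (the rewrite author's own statement) =====
-- stated objective: alternative
-- what changed: Replaces A's in-degree counter dict and per-node count==0 scan by a sort-based set difference: the keys and the distinct neighbor values are each sorted and a single two-pointer merge emits the keys that never occur as a neighbor.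
import Mathlib
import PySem

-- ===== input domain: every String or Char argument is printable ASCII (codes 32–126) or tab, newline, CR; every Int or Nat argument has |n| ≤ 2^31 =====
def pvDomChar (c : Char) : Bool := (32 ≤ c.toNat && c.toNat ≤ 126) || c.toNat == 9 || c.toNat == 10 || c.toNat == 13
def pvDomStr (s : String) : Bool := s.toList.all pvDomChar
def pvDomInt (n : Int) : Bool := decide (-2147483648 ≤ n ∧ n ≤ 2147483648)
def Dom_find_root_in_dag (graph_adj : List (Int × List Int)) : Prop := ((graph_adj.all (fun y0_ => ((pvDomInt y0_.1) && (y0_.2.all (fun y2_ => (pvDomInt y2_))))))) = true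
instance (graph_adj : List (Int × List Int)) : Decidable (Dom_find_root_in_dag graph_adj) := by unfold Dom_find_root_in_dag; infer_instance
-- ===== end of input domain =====

-- B replaces A's in-degree counter dict by a sorted set-difference: keys and distinct neighbor
-- values are sorted and a two-pointer merge emits the keys absent from the neighbors (alternative algorithm, similar cost).


-- ===== PORT A =====
def find_root_in_dag (graph_adj : List (Int × List Int)) : Option Int :=
  -- in_degree = defaultdict(int); nodes = set()
  -- for node, neighbors in graph_adj.items(): nodes.add(node); for neighbor: in_degree[neighbor] += 1; nodes.add(neighbor)
  let st := graph_adj.foldl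
    (fun (st : PySem.Dict Int Int × PySem.Set Int) p =>
      p.2.foldl (fun st nb => (st.1.modify nb 0 (· + 1), PySem.Set.add st.2 nb))
        (st.1, PySem.Set.add st.2 p.1))
    (PySem.Dict.empty, PySem.Set.empty)
  let in_degree := st.1
  let nodes := st.2
  -- root_candidates = [node for node in nodes if in_degree[node] == 0]  (result is order-independent)
  let root_candidates := nodes.foldl
    (fun acc node => if in_degree.getD node 0 == 0 then acc ++ [node] else acc) []
  if root_candidates.length == 1 then PySem.List.pyGet? root_candidates 0 else none

-- ===== PORT B =====
-- while i < m and targets[i] < k: i += 1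
def pvSkipB (targets : List Int) (k : Int) (i : Nat) : Nat :=
  if h : i < targets.length ∧ targets[i]! < k then pvSkipB targets k (i + 1) else i
termination_by targets.length - i
decreasing_by omega

def find_root_in_dag_alt (graph_adj : List (Int × List Int)) : Option Int :=
  -- keys = sorted(graph_adj); targets = sorted({n for ns in graph_adj.values() for n in ns})
  let keys := PySem.List.sorted (graph_adj.map Prod.fst) (fun x => x) false
  let targets := PySem.List.sorted (PySem.Set.ofList (graph_adj.flatMap Prod.snd)) (fun x => x) false
  -- roots = []; i = 0; for k in keys: <skip>; if i == m or targets[i] != k: roots.append(k)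
  let st := keys.foldl
    (fun (st : Nat × List Int) k =>
      let i := pvSkipB targets k st.1
      if i == targets.length || targets[i]! != k then (i, st.2 ++ [k]) else (i, st.2))
    (0, [])
  let roots := st.2
  if roots.length == 1 then PySem.List.pyGet? roots 0 else none

-- ===== PRECONDITION & SPEC =====
-- Pre_ excludes association lists with duplicate keys: a Python dict has no such input, the
-- assoc-list encoding of one is ambiguous there (Python keeps the last value per key).
def Pre_find_root_in_dag (graph_adj : List (Int × List Int)) : Prop :=
  (graph_adj.map Prod.fst).Nodup
instance (graph_adj : List (Int × List Int)) : Decidable (Pre_find_root_in_dag graph_adj) := by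
  unfold Pre_find_root_in_dag; infer_instance
def pvWitness_find_root_in_dag : (List (Int × List Int)) := [(0, [1, 2]), (1, [3]), (2, [3]), (3, [])]

def Spec_find_root_in_dag (graph_adj : List (Int × List Int)) (out : Option Int) : Prop := out = find_root_in_dag_alt graph_adj
instance (graph_adj : List (Int × List Int)) (out : Option Int) : Decidable (Spec_find_root_in_dag graph_adj out) := by unfold Spec_find_root_in_dag; infer_instance

-- ===== CLAIM (what is proved, stated in full; the proofs are below) =====
def Claim_equal_find_root_in_dag : Prop := ∀ (graph_adj : List (Int × List Int)), Dom_find_root_in_dag graph_adj → Pre_find_root_in_dag graph_adj → Spec_find_root_in_dag graph_adj (find_root_in_dag graph_adj)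

-- ===== LEMMAS AND PROOFS =====

-- A's combined loop over (in_degree, nodes) splits into its two components.
theorem pv_inner_split (ns : List Int) (d : PySem.Dict Int Int) (s : PySem.Set Int) :
    ns.foldl (fun (st : PySem.Dict Int Int × PySem.Set Int) nb =>
        (st.1.modify nb 0 (· + 1), PySem.Set.add st.2 nb)) (d, s)
      = (ns.foldl (fun d nb => d.modify nb 0 (· + 1)) d, ns.foldl PySem.Set.add s) := by
  induction ns generalizing d s with
  | nil => rfl
  | cons n ns ih => simp [List.foldl_cons, ih]

theorem pv_outer_split (gs : List (Int × List Int)) (d : PySem.Dict Int Int) (s : PySem.Set Int) :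
    gs.foldl (fun (st : PySem.Dict Int Int × PySem.Set Int) p =>
        p.2.foldl (fun st nb => (st.1.modify nb 0 (· + 1), PySem.Set.add st.2 nb))
          (st.1, PySem.Set.add st.2 p.1)) (d, s)
      = ((gs.flatMap Prod.snd).foldl (fun d nb => d.modify nb 0 (· + 1)) d,
         (gs.flatMap (fun p => p.1 :: p.2)).foldl PySem.Set.add s) := by
  induction gs generalizing d s with
  | nil => rfl
  | cons g gs ih =>
      rw [List.foldl_cons, pv_inner_split, ih]
      simp only [List.flatMap_cons, List.foldl_append, List.foldl_cons]

-- A's in-degree test "in_degree[node] == 0" is membership of node among the flattened neighbors.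
theorem pv_predA (flat : List Int) (n : Int) :
    ((flat.foldl (fun d nb => d.modify nb 0 (· + 1)) (PySem.Dict.empty : PySem.Dict Int Int)).getD
        n 0 == 0) = !(flat.contains n) := by
  rw [PySem.Dict.getD_foldl_modify_add_one]
  simp only [PySem.Dict.getD_empty, zero_add, List.contains_eq_mem]
  by_cases h : n ∈ flat
  · simp [h, Int.natCast_eq_zero, Nat.pos_iff_ne_zero.mp (List.count_pos_iff.mpr h)]
  · simp [h, List.count_eq_zero.mpr h]

-- a node outside the neighbor list lies in the interleaved key/neighbor sequence iff it is a key
theorem pv_seq_mem (gs : List (Int × List Int)) (n : Int) (hn : n ∉ gs.flatMap Prod.snd) :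
    n ∈ gs.flatMap (fun p => p.1 :: p.2) ↔ n ∈ gs.map Prod.fst := by
  simp only [List.mem_flatMap, List.mem_cons, List.mem_map]
  constructor
  · rintro ⟨p, hp, h | h⟩
    · exact ⟨p, hp, h.symm⟩
    · exact absurd (List.mem_flatMap.mpr ⟨p, hp, h⟩) hn
  · rintro ⟨p, hp, h⟩
    exact ⟨p, hp, Or.inl h.symm⟩

-- the while loop: it only moves forward over elements < k, stops at length or at an element ≥ k
theorem pvSkipB_spec (T : List Int) (k : Int) (i : Nat) (hi : i ≤ T.length) :
    i ≤ pvSkipB T k i ∧ pvSkipB T k i ≤ T.length ∧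
      (∀ j, i ≤ j → j < pvSkipB T k i → T[j]! < k) ∧
      (pvSkipB T k i < T.length → ¬ T[pvSkipB T k i]! < k) := by
  fun_induction pvSkipB T k i with
  | case1 i h ih =>
      obtain ⟨h1, h2, h3, h4⟩ := ih h.1
      refine ⟨by omega, h2, ?_, h4⟩
      intro j hij hj
      rcases Nat.eq_or_lt_of_le hij with rfl | hlt
      · exact h.2
      · exact h3 j hlt hj
  | case2 i h =>
      refine ⟨le_refl _, hi, fun j h1 h2 => absurd h2 (by omega), fun hl => ?_⟩
      intro hlt
      exact h ⟨hl, hlt⟩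

-- pairwise ≤ plus Nodup gives pairwise <
theorem pv_pairwise_lt {xs : List Int} (h1 : xs.Pairwise (· ≤ ·)) (h2 : xs.Nodup) :
    xs.Pairwise (· < ·) := by
  have := h1.and h2
  exact this.imp (fun h => lt_of_le_of_ne h.1 h.2)

-- the two-pointer merge over sorted lists is the filter "not a member of T"
theorem pv_fold_diff (T : List Int) (hT : T.Pairwise (· < ·)) :
    ∀ (ks : List Int) (i : Nat) (acc : List Int), i ≤ T.length →
      ks.Pairwise (· < ·) →
      (∀ j, j < i → ∀ k ∈ ks, T[j]! < k) →
      (ks.foldl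
        (fun (st : Nat × List Int) k =>
          let i := pvSkipB T k st.1
          if i == T.length || T[i]! != k then (i, st.2 ++ [k]) else (i, st.2))
        (i, acc)).2 = acc ++ ks.filter (fun k => !(T.contains k)) := by
  intro ks
  induction ks with
  | nil => intro i acc hi _ _; simp
  | cons k ks ih =>
    intro i acc hi hks hinv
    rw [List.pairwise_cons] at hks
    obtain ⟨hk, hks'⟩ := hks
    obtain ⟨hle, hlen, hmid, hstop⟩ := pvSkipB_spec T k i hi
    have hall : ∀ j, j < pvSkipB T k i → T[j]! < k := by
      intro j hj
      by_cases hji : j < i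
      · exact hinv j hji k (List.mem_cons_self)
      · exact hmid j (by omega) hj
    have hmem : k ∈ T ↔ (pvSkipB T k i < T.length ∧ T[pvSkipB T k i]! = k) := by
      constructor
      · intro hm
        obtain ⟨j, hjl, hje⟩ := List.mem_iff_getElem.mp hm
        have hje' : T[j]! = k := by rw [getElem!_pos T j hjl]; exact hje
        have hji' : ¬ j < pvSkipB T k i := fun h => absurd hje' (by have := hall j h; omega)
        have hil : pvSkipB T k i < T.length := by omega
        refine ⟨hil, ?_⟩
        rcases Nat.eq_or_lt_of_le (Nat.le_of_not_lt hji') with heq | hlt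
        · rw [heq]; exact hje'
        · exfalso
          have hpl := (List.pairwise_iff_getElem.mp hT) (pvSkipB T k i) j hil hjl hlt
          rw [getElem!_pos T _ hil] at hstop
          rw [hje] at hpl
          exact hstop hil hpl
      · rintro ⟨hil, hreq⟩
        rw [getElem!_pos T _ hil] at hreq
        exact hreq ▸ List.getElem_mem hil
    have hstep : (fun (st : Nat × List Int) k =>
        let i := pvSkipB T k st.1
        if i == T.length || T[i]! != k then (i, st.2 ++ [k]) else (i, st.2)) (i, acc) k
        = (pvSkipB T k i, if T.contains k then acc else acc ++ [k]) := by
      show (if pvSkipB T k i == T.length || T[pvSkipB T k i]! != k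
            then (pvSkipB T k i, acc ++ [k]) else (pvSkipB T k i, acc)) = _
      by_cases hm : k ∈ T
      · obtain ⟨hil, heq⟩ := hmem.mp hm
        rw [if_neg, if_pos (by simpa [List.contains_eq_mem] using hm)]
        simp [heq, Nat.ne_of_lt hil]
      · have hcond : (pvSkipB T k i == T.length || T[pvSkipB T k i]! != k) = true := by
          simp only [Bool.or_eq_true, beq_iff_eq, bne_iff_ne]
          by_cases hil : pvSkipB T k i < T.length
          · exact Or.inr (fun h => hm (hmem.mpr ⟨hil, h⟩))
          · exact Or.inl (by omega)
        rw [if_pos hcond, if_neg (by simpa [List.contains_eq_mem] using hm)]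
    rw [List.foldl_cons]
    simp only [hstep]
    rw [ih (pvSkipB T k i) _ hlen hks'
        (fun j hj k2 hk2 => lt_trans (hall j hj) (hk k2 hk2))]
    by_cases hm : k ∈ T
    · rw [if_pos (by simpa [List.contains_eq_mem] using hm),
        List.filter_cons_of_neg (by simpa [List.contains_eq_mem] using hm)]
    · rw [if_neg (by simpa [List.contains_eq_mem] using hm),
        List.filter_cons_of_pos (by simpa [List.contains_eq_mem] using hm)]
      simp

-- "unique element or None" readout agrees for Nodup lists with the same members
theorem pv_final (xs ys : List Int) (hx : xs.Nodup) (hy : ys.Nodup)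
    (hmm : ∀ n, n ∈ xs ↔ n ∈ ys) :
    (if (xs.length == 1) = true then PySem.List.pyGet? xs 0 else none)
      = (if (ys.length == 1) = true then PySem.List.pyGet? ys 0 else none) := by
  have hperm : xs.Perm ys := (List.perm_ext_iff_of_nodup hx hy).mpr hmm
  rw [hperm.length_eq]
  by_cases h1 : ys.length = 1
  · obtain ⟨a, ha⟩ := List.length_eq_one_iff.mp (hperm.length_eq.trans h1)
    obtain ⟨b, hb⟩ := List.length_eq_one_iff.mp h1
    have hab : a = b := by
      have := (hmm a).mp (ha ▸ List.mem_singleton_self a)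
      rw [hb] at this
      exact List.mem_singleton.mp this
    rw [ha, hb, hab]
  · simp [h1]

-- ===== VERDICT (by name: the statement is the Claim_ definition above) =====
theorem find_root_in_dag_spec : Claim_equal_find_root_in_dag := by
  intro gs _ hpre
  unfold Spec_find_root_in_dag find_root_in_dag find_root_in_dag_alt
  dsimp only
  simp only [pv_outer_split, PySem.List.foldl_append_if_eq_filter, List.nil_append]
  simp only [pv_predA, PySem.Set.empty_eq]
  rw [← PySem.Set.ofList_eq_foldl]
  have hT := PySem.List.sorted_ofList_pairwise_lt (gs.flatMap Prod.snd)
  have hkperm : (PySem.List.sorted (gs.map Prod.fst) (fun x => x) false).Perm (gs.map Prod.fst) :=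
    PySem.List.sorted_perm (gs.map Prod.fst) (fun x => x) false
  have hknodup : (PySem.List.sorted (gs.map Prod.fst) (fun x => x) false).Nodup :=
    hkperm.nodup_iff.mpr hpre
  have hklt : (PySem.List.sorted (gs.map Prod.fst) (fun x => x) false).Pairwise (· < ·) :=
    pv_pairwise_lt (PySem.List.sorted_pairwise (gs.map Prod.fst) (fun x => x)) hknodup
  rw [pv_fold_diff _ hT _ 0 [] (Nat.zero_le _) hklt (fun j hj => absurd hj (by omega)),
    List.nil_append]
  apply pv_final
  · exact (PySem.Set.nodup_ofList _).filter _
  · exact hknodup.filter _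
  · intro n
    simp only [List.mem_filter, PySem.Set.mem_ofList, PySem.List.mem_sorted,
      List.contains_eq_mem, Bool.not_eq_eq_eq_not, Bool.not_true, decide_eq_false_iff_not]
    constructor
    · rintro ⟨hm, hnf⟩
      exact ⟨(pv_seq_mem gs n hnf).mp hm, hnf⟩
    · rintro ⟨hm, hnf⟩
      exact ⟨(pv_seq_mem gs n hnf).mpr hm, hnf⟩
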